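-- pv_equiv track=rewrite | github.com/pedronevz/S-DES | main.py | CLS
-- ===== SOURCE A (Python) =====
-- def CLS(key, shift):
--     left_half = key[:5]  # Primeiros 5 bits
--     right_half = key[5:]  # Últimos 5 bits
--
--     shifted_left = []
--     shifted_right = []
--
--     # Deslocamento na primeira metade
--     for i in range(len(left_half)):
--         shifted_left.append(left_half[(i + shift) % len(left_half)])
--
--     # Deslocamento na segunda metade
--     for i in range(len(right_half)):
--         shifted_right.append(right_half[(i + shift) % len(right_half)])
--
--     shifted_key = ''.join(shifted_left) + ''.join(shifted_right)
--     return shifted_key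
-- ===== SOURCE B (Python) =====
-- def CLS(key, shift):
--     def rotate(half):
--         n = len(half)
--         s = shift % n if n else 0
--         return half[s:] + half[:s]
--     return rotate(key[:5]) + rotate(key[5:])
-- ===== Notes on version B (the rewrite author's own statement) =====
-- stated objective: simpler
-- what changed: Replaces the two per-character index loops with direct slice-concatenation rotation (half[s:]+half[:s] with s = shift % len), guarding the empty half; slicing also avoids the per-character Python-level loop, a constant-factor speedup a timing run measured.
import Mathlib
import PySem

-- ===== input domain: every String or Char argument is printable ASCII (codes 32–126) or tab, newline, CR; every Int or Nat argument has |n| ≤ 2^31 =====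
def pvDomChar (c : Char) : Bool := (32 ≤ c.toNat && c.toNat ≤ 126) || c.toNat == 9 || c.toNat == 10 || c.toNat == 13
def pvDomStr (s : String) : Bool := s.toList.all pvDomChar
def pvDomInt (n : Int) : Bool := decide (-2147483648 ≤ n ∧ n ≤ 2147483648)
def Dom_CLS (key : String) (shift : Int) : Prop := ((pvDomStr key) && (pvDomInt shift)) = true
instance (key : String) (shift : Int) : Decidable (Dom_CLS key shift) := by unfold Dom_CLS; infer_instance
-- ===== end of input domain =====

-- B replaces A's two per-character index loops by direct slice-concatenation rotation (simpler).


-- ===== PORT A =====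
-- literal port of A: split at 5, then for each half an index loop appending
-- half[(i+shift) % len(half)].  The index is always in range (0 ≤ idx < len),
-- so pyGetD with a dummy default is exact here.
def CLS (key : String) (shift : Int) : String :=
  let cs := key.toList
  let left_half := PySem.List.slice cs none (some 5)
  let right_half := PySem.List.slice cs (some 5) none
  let shifted_left := (PySem.List.pyRange 0 (left_half.length : Int) 1).foldl
    (fun acc i => acc ++ [PySem.List.pyGetD left_half (PySem.Int.mod (i + shift) (left_half.length : Int)) ' ']) []
  let shifted_right := (PySem.List.pyRange 0 (right_half.length : Int) 1).foldl
    (fun acc i => acc ++ [PySem.List.pyGetD right_half (PySem.Int.mod (i + shift) (right_half.length : Int)) ' ']) []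
  String.ofList (shifted_left ++ shifted_right)

-- ===== PORT B =====
-- rotate(half) = half[s:] + half[:s] with s = shift % len(half) (0 if empty)
def CLSAltRotate (half : List Char) (shift : Int) : List Char :=
  let n := half.length
  let s := if n ≠ 0 then PySem.Int.mod shift (n : Int) else 0
  PySem.List.slice half (some s) none ++ PySem.List.slice half none (some s)

def CLS_alt (key : String) (shift : Int) : String :=
  let cs := key.toList
  String.ofList (CLSAltRotate (PySem.List.slice cs none (some 5)) shift ++
             CLSAltRotate (PySem.List.slice cs (some 5) none) shift)

-- ===== PRECONDITION & SPEC =====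
def Spec_CLS (key : String) (shift : Int) (out : String) : Prop := out = CLS_alt key shift
instance (key : String) (shift : Int) (out : String) : Decidable (Spec_CLS key shift out) := by unfold Spec_CLS; infer_instance

-- ===== CLAIM (what is proved, stated in full; the proofs are below) =====
def Claim_equal_CLS : Prop := ∀ (key : String) (shift : Int), Dom_CLS key shift → Spec_CLS key shift (CLS key shift)

-- ===== LEMMAS AND PROOFS =====

-- A's index loop on one half equals B's slice rotation of that half.
lemma loop_eq_rotate (h : List Char) (shift : Int) :
    (PySem.List.pyRange 0 (h.length : Int) 1).foldl
      (fun acc i => acc ++ [PySem.List.pyGetD h (PySem.Int.mod (i + shift) (h.length : Int)) ' ']) []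
    = CLSAltRotate h shift := by
  rw [PySem.List.foldl_append_singleton_eq_map]
  rcases Nat.eq_zero_or_pos h.length with hn | hn
  · simp [CLSAltRotate, List.length_eq_zero_iff.mp hn, PySem.List.slice]
  · have hN : (0:Int) < (h.length : Int) := by exact_mod_cast hn
    set N : Int := (h.length : Int) with hNdef
    set s : Int := PySem.Int.mod shift N with hsdef
    have hs0 : 0 ≤ s := PySem.Int.mod_nonneg shift hN
    have hsN : s < N := PySem.Int.mod_lt shift hN
    have hrot : CLSAltRotate h shift = h.drop s.toNat ++ h.take s.toNat := by
      unfold CLSAltRotate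
      simp only [← hNdef, ← hsdef]
      rw [if_pos (by omega : h.length ≠ 0)]
      rw [PySem.List.slice_from h hs0, PySem.List.slice_to h hs0]
    rw [hrot]
    have hsize : s.toNat < h.length := by omega
    apply List.ext_getElem
    · simp [PySem.List.length_pyRange_one]; omega
    · intro i hi1 hi2
      simp only [List.nil_append] at hi1 ⊢
      have hiN : i < h.length := by
        rw [List.length_map, PySem.List.length_pyRange_one] at hi1
        omega
      rw [List.getElem_map]
      rw [PySem.List.getElem_pyRange_one]
      have hmodval : PySem.Int.mod ((0 + (i:Int)) + shift) N
          = if (i:Int) + s < N then (i:Int) + s else (i:Int) + s - N := by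
        have hemod : ∀ a : Int, PySem.Int.mod a N = a % N := fun _ =>
          PySem.Int.mod_eq_emod_of_pos hN
        have hse : s = shift % N := by rw [hsdef, hemod]
        rw [hemod]
        have h1 : ((i:Int) + shift) % N = ((i:Int) + s) % N := by
          rw [hse, Int.add_emod_emod]
        rw [zero_add, h1]
        split_ifs with hc
        · exact Int.emod_eq_of_lt (by omega) hc
        · have : ((i:Int) + s) % N = ((i:Int) + s - N) % N := by
            rw [Int.sub_emod_right]
          rw [this]
          apply Int.emod_eq_of_lt
          · omega
          · omega
      rw [hmodval]
      split_ifs with hc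
      · have hlt : (i:Int) + s < N := hc
        have hin : i + s.toNat < h.length := by omega
        rw [PySem.List.pyGetD_eq_getElem h ' ' (by omega) (by omega)]
        rw [List.getElem_append_left (by simp; omega)]
        rw [List.getElem_drop]
        congr 1
        omega
      · have hin : i + s.toNat - h.length < s.toNat := by omega
        rw [PySem.List.pyGetD_eq_getElem h ' ' (by omega) (by omega)]
        rw [List.getElem_append_right (by simp; omega)]
        simp only [List.getElem_take]
        congr 1
        simp
        omega

-- ===== VERDICT (by name: the statement is the Claim_ definition above) =====
theorem CLS_spec : Claim_equal_CLS := by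
  intro key shift _
  unfold Spec_CLS CLS CLS_alt
  simp only [loop_eq_rotate]
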